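-- pv_equiv track=rewrite | github.com/nhhoang14/CodePTIT_Source | CodePTIT - PYTHON/PY01039 - KIỂM TRA SỐ ĐẸP.py | check
-- ===== SOURCE A (Python) =====
-- def check(s):
--     a = s[0]
--     b = s[1]
--     if a == b:
--         return "NO"
--     for i in range(2, len(s)):
--         if i % 2 == 0 and s[i] != a:
--             return "NO"
--         if i % 2 == 1 and s[i] != b:
--             return "NO"
--     return "YES"
-- ===== SOURCE B (Python) =====
-- def check(s):
--     a = s[0]
--     b = s[1]
--     if a == b:
--         return "NO"
--     expected = (a + b) * (len(s) // 2) + a * (len(s) % 2)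
--     return "YES" if s == expected else "NO"
-- ===== Notes on version B (the rewrite author's own statement) =====
-- stated objective: simpler
-- what changed: B builds the whole expected alternating string once by repetition and compares it to s, instead of A's index loop with i%2 parity branches and early returns.
import Mathlib
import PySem

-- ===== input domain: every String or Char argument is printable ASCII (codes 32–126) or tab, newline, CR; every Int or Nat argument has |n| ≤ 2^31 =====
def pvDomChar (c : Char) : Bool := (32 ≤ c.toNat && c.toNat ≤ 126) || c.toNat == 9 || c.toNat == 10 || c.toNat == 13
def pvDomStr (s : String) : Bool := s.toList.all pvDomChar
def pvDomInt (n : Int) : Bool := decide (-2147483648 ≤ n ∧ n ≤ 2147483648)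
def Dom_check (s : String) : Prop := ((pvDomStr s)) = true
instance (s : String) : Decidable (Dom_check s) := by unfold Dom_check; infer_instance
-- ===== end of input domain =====

-- B replaces A's parity-branching index loop by building the expected alternating
-- string once and comparing; equivalence is about the return value only.

-- ===== PORT A =====
-- the for-loop over range(2, len(s)) with early returns, as structural recursion
-- over the suffix of the string starting at index 2, carrying the index i
def checkLoop (a b : Char) : List Char → Nat → String
  | [], _ => "YES"
  | c :: rest, i =>
    if i % 2 == 0 && c != a then "NO"
    else if i % 2 == 1 && c != b then "NO"
    else checkLoop a b rest (i + 1)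

def check (s : String) : String :=
  match s.toList with
  | a :: b :: rest =>
    if a == b then "NO"
    else checkLoop a b rest 2
  | _ => "NO"  -- unreachable under Pre_check: Python raises IndexError for len(s) < 2

-- ===== PORT B =====
def check_alt (s : String) : String :=
  match PySem.Str.pyGet? s 0, PySem.Str.pyGet? s 1 with
  | some a, some b =>
    if a == b then "NO"
    else
      let n := s.length
      let expected : List Char := (List.replicate (n / 2) [a, b]).flatten ++ List.replicate (n % 2) a
      if s.toList == expected then "YES" else "NO"
  | _, _ => "NO"  -- unreachable under Pre_check: Python raises IndexError on s[0]/s[1] for len(s) < 2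

-- ===== PRECONDITION & SPEC =====
-- Pre_ excludes strings of length < 2, on which both A and B raise IndexError (s[1]).
def Pre_check (s : String) : Prop := 2 ≤ s.length
instance (s : String) : Decidable (Pre_check s) := by unfold Pre_check; infer_instance
def pvWitness_check : String := "ab"

def Spec_check (s : String) (out : String) : Prop := out = check_alt s
instance (s : String) (out : String) : Decidable (Spec_check s out) := by unfold Spec_check; infer_instance

-- ===== CLAIM (what is proved, stated in full; the proofs are below) =====
def Claim_equal_check : Prop := ∀ (s : String), Dom_check s → Pre_check s → Spec_check s (check s)

-- ===== LEMMAS AND PROOFS =====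

-- Boolean "l is the alternating pattern a,b,a,b,… read from index i"
def patOk (a b : Char) : List Char → Nat → Bool
  | [], _ => true
  | c :: rest, i => (if i % 2 == 0 then c == a else c == b) && patOk a b rest (i + 1)

theorem checkLoop_eq_patOk (a b : Char) (l : List Char) (i : Nat) :
    checkLoop a b l i = (if patOk a b l i then "YES" else "NO") := by
  induction l generalizing i with
  | nil => simp [checkLoop, patOk]
  | cons c rest ih =>
    rcases Nat.mod_two_eq_zero_or_one i with h | h <;>
      simp only [checkLoop, patOk, ih, h] <;>
      by_cases hc : c = a <;> by_cases hd : c = b <;> simp_all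

theorem patOk_shift (a b : Char) (l : List Char) (i : Nat) :
    patOk a b l (i + 2) = patOk a b l i := by
  induction l generalizing i with
  | nil => rfl
  | cons c rest ih =>
    simp only [patOk, Nat.add_mod_right]
    rw [show i + 2 + 1 = (i + 1) + 2 by omega, ih]

theorem patOk_two (a b : Char) (l : List Char) :
    patOk a b l 2 = patOk a b l 0 := by
  simpa using patOk_shift a b l 0

def pat (a b : Char) (n : Nat) : List Char :=
  (List.replicate (n / 2) [a, b]).flatten ++ List.replicate (n % 2) a

theorem pat_succ_succ (a b : Char) (n : Nat) :
    pat a b (n + 2) = a :: b :: pat a b n := by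
  simp [pat, Nat.add_div_right, Nat.add_mod_right, List.replicate_succ]

theorem key (a b : Char) : ∀ l : List Char, (l = pat a b l.length) ↔ patOk a b l 0 = true
  | [] => by simp [pat, patOk]
  | [c] => by simp [pat, patOk]
  | c :: d :: rest => by
    have ih := key a b rest
    simp only [List.length_cons]
    rw [show rest.length + 1 + 1 = rest.length + 2 by omega, pat_succ_succ]
    constructor
    · rintro h
      rw [List.cons.injEq, List.cons.injEq] at h
      obtain ⟨rfl, rfl, h⟩ := h
      simp [patOk, patOk_two, ih.mp h]
    · intro h
      simp [patOk, patOk_two] at h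
      obtain ⟨h1, h2, h3⟩ := h
      simp only [List.cons.injEq]
      exact ⟨h1, h2, ih.mpr h3⟩

-- ===== VERDICT (by name: the statement is the Claim_ definition above) =====
theorem check_spec : Claim_equal_check := by
  intro s _ hpre
  unfold Spec_check check check_alt
  have hlen : s.length = s.toList.length := (String.length_toList).symm
  cases hl : s.toList with
  | nil =>
    exact absurd hpre (by rw [Pre_check, hlen, hl]; simp)
  | cons a t =>
    cases t with
    | cons b rest =>
      have h0 : PySem.Str.pyGet? s 0 = some a := by
        rw [show (0:Int) = ((0:Nat):Int) from rfl, PySem.Str.pyGet?_natCast, hl]; rfl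
      have h1 : PySem.Str.pyGet? s 1 = some b := by
        rw [show (1:Int) = ((1:Nat):Int) from rfl, PySem.Str.pyGet?_natCast, hl]; rfl
      rw [h0, h1]
      dsimp only
      by_cases hab : a = b
      · simp [hab]
      · have hn : s.length = rest.length + 2 := by
          rw [hlen, hl]; simp only [List.length_cons]
        have hexp : ((List.replicate (s.length / 2) [a, b]).flatten
            ++ List.replicate (s.length % 2) a) = a :: b :: pat a b rest.length := by
          rw [hn]; exact pat_succ_succ a b rest.length
        rw [checkLoop_eq_patOk]
        simp only [beq_iff_eq, hab, if_false, hexp, List.cons.injEq, true_and]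
        rw [patOk_two]
        by_cases h : patOk a b rest 0 = true
        · rw [if_pos h, if_pos ((key a b rest).mpr h)]
        · have hne : rest ≠ pat a b rest.length := fun he => h ((key a b rest).mp he)
          rw [if_neg h, if_neg hne]
    | nil =>
      exact absurd hpre (by rw [Pre_check, hlen, hl]; simp)
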